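-- pv_equiv track=rewrite | github.com/JozsefKutas/project-euler-math | project_euler_math/ntheory.py | ndiv_list
-- ===== SOURCE A (Python) =====
-- from math import prod, inf, isqrt, gcd as mathgcd, lcm as mathlcm
-- from typing import Sequence, List, Mapping, Optional, Iterator, Callable, TypeVar
--
-- def prime_factor_list(end: int) -> List[int]:
--     """Return a list of length `end`, the i-th element of which is the smallest
--     prime factor of i."""
--     ans = list(range(end))
--     for i in range(2, isqrt(end) + 1):
--         if ans[i] == i:
--             for j in range(i, end, i):
--                 if ans[j] == j:
--                     ans[j] = i
--     return ans
--
-- def ndiv_list(end: int, prime_factors: Optional[List[int]] = None) -> List[int]: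
--     """Return a list of length `end`, the i-th element of which is the number of
--     divisors of i."""
--     ans = _prepare_prime_factors(prime_factors, end)
--
--     for i in range(2, end):
--         p = ans[i]
--         e = 1
--         j = i // p
--         while j % p == 0:
--             j //= p
--             e += 1
--         ans[i] = (e + 1) * ans[j]
--     return ans
--
-- def _prepare_prime_factors(prime_factors, end):
--     if prime_factors:
--         if len(prime_factors) < end:
--             raise ValueError
--         return prime_factors[:end]
--     else:
--         return prime_factor_list(end)
-- ===== SOURCE B (Python) =====
-- from math import isqrt
-- from typing import List, Optional
--
--
-- def prime_factor_list(end: int) -> List[int]: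
--     """Return a list of length `end`, the i-th element of which is the smallest
--     prime factor of i."""
--     ans = list(range(end))
--     for i in range(2, isqrt(end) + 1):
--         if ans[i] == i:
--             for j in range(i, end, i):
--                 if ans[j] == j:
--                     ans[j] = i
--     return ans
--
--
-- def _prepare_prime_factors(prime_factors, end):
--     if prime_factors:
--         if len(prime_factors) < end:
--             raise ValueError
--         return prime_factors[:end]
--     else:
--         return prime_factor_list(end)
--
--
-- def ndiv_list(end: int, prime_factors: Optional[List[int]] = None) -> List[int]:
--     """Return a list of length `end`, the i-th element of which is the number of
--     divisors of i.
--
--     Instead of the memoized DP (which reuses previously computed divisor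
--     counts), each i is factored independently against the untouched SPF
--     table `spf`, writing its divisor count into a separate result array.
--     """
--     spf = _prepare_prime_factors(prime_factors, end)
--     ans = list(spf)
--     for i in range(2, end):
--         cur = i
--         result = 1
--         while cur > 1:
--             p = spf[cur]
--             e = 0
--             while cur % p == 0:
--                 cur //= p
--                 e += 1
--             result *= e + 1
--         ans[i] = result
--     return ans
-- ===== Notes on version B (the rewrite author's own statement) =====
-- stated objective: alternative
-- what changed: A fills one array by a memoized DP, computing ans[i] = (e+1)*ans[i // p^e] from the already-overwritten earlier entries; B instead factors each i completely and independently against the untouched SPF table (inner loop over all prime factors of i with an accumulator) and writes the divisor counts into a separate result array, reusing nothing.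
-- outside the precondition, e.g. on ndiv_list(3, [5, 7, 2]): A returns [5, 7, 14], B returns [5, 7, 2]; on ndiv_list(-1, None): A raises ValueError, B raises ValueError
import Mathlib
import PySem

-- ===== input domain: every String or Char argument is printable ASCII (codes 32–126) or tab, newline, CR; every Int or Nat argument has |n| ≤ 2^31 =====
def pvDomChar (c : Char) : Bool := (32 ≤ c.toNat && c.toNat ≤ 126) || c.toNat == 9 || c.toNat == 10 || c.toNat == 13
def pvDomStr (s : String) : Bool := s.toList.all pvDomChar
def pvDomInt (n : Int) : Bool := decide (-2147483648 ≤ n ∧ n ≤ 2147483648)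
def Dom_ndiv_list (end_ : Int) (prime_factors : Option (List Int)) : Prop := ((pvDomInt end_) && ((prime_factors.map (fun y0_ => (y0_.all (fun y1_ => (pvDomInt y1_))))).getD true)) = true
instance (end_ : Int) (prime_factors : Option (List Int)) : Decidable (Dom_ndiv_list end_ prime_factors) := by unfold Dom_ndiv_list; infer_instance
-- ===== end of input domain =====

-- B replaces A's memoized DP (ans[i] = (e+1)*ans[i // p^e], reusing earlier entries of the
-- array being built) by an independent full factorization of each i against the untouched
-- SPF table; objective: alternative (same asymptotic cost, no reuse of previous results).

-- ===== PORT A =====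
-- helpers shared by both ports: prime_factor_list and _prepare_prime_factors are
-- textually identical helper functions in Source A and Source B.

-- inner 'for j in range(i, end, i)' of prime_factor_list; indices j are ≥ i ≥ 2 ≥ 0 and,
-- for j < end ≤ len ans, in range, so pyGetD/pySetD are exact for ans[j] / ans[j] = i.
def pfInner (i end_ : Int) (ans : List Int) : List Int :=
  (PySem.List.pyRange i end_ i).foldl
    (fun a j => if PySem.List.pyGetD a j 0 = j then PySem.List.pySetD a j i else a) ans

-- prime_factor_list; math.isqrt(end) = Nat.sqrt end.toNat, exact for 0 ≤ end
-- (for end < 0 Python raises ValueError — excluded by Pre_).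
def prime_factor_list (end_ : Int) : List Int :=
  (PySem.List.pyRange 2 ((end_.toNat.sqrt : Int) + 1) 1).foldl
    (fun a i => if PySem.List.pyGetD a i 0 = i then pfInner i end_ a else a)
    (PySem.List.pyRange 0 end_ 1)

-- _prepare_prime_factors; the 'raise ValueError' branch (nonempty table shorter than end)
-- is excluded by Pre_, the port returns [] there.
def preparePrimeFactors (prime_factors : Option (List Int)) (end_ : Int) : List Int :=
  match prime_factors with
  | some l =>
      if l = [] then prime_factor_list end_
      else if (l.length : Int) < end_ then []
      else PySem.List.slice l none (some end_)
  | none => prime_factor_list end_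

-- A's inner 'while j % p == 0: j //= p; e += 1'; fuel bounds the iteration count
-- (inside Pre_, p ≥ 2 and j shrinks each pass, so fuel = i suffices).
def stripA (p : Int) : Nat → Int × Int → Int × Int
  | 0, je => je
  | fuel + 1, (j, e) =>
      if PySem.Int.mod j p = 0 then stripA p fuel (PySem.Int.floordiv j p, e + 1) else (j, e)

def ndiv_list (end_ : Int) (prime_factors : Option (List Int)) : List Int :=
  (PySem.List.pyRange 2 end_ 1).foldl
    (fun a i =>
      let p := PySem.List.pyGetD a i 0
      let je := stripA p i.toNat (PySem.Int.floordiv i p, 1)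
      PySem.List.pySetD a i ((je.2 + 1) * PySem.List.pyGetD a je.1 0))
    (preparePrimeFactors prime_factors end_)

-- ===== PORT B =====
-- B's inner 'while cur % p == 0: cur //= p; e += 1' (starts at e = 0).
def stripAlt (p : Int) : Nat → Int × Int → Int × Int
  | 0, ce => ce
  | fuel + 1, (cur, e) =>
      if PySem.Int.mod cur p = 0 then stripAlt p fuel (PySem.Int.floordiv cur p, e + 1) else (cur, e)

-- B's outer 'while cur > 1' loop: full factorization of cur against the untouched spf table;
-- fuel bounds the number of distinct prime factors (inside Pre_, cur shrinks each pass).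
def factorCount (spf : List Int) : Nat → Int → Int → Int
  | 0, _, result => result
  | fuel + 1, cur, result =>
      if 1 < cur then
        let p := PySem.List.pyGetD spf cur 0
        let ce := stripAlt p cur.toNat (cur, 0)
        factorCount spf fuel ce.1 (result * (ce.2 + 1))
      else result

def ndiv_list_alt (end_ : Int) (prime_factors : Option (List Int)) : List Int :=
  let spf := preparePrimeFactors prime_factors end_
  (PySem.List.pyRange 2 end_ 1).foldl
    (fun a i => PySem.List.pySetD a i (factorCount spf i.toNat i 1)) spf

-- ===== PRECONDITION & SPEC =====
-- Pre_ excludes the inputs where A raises (negative end with no/empty table: isqrt ValueError;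
-- a nonempty table shorter than end: ValueError) and, restricting to the function's documented
-- domain, nonempty tables that are not valid smallest-prime-factor tables (entry 1 not 1, or an
-- entry below 2 that is not a divisor of its index): on such garbage tables A divides by zero or
-- loops forever on many inputs, and where it does return, the value merely propagates the
-- arbitrary table entries through A's DP — an accident of the representation B need not match.
def Pre_ndiv_list (end_ : Int) (prime_factors : Option (List Int)) : Prop :=
  let l := prime_factors.getD []
  if l = [] then 0 ≤ end_
  else end_ ≤ (l.length : Int) ∧
    (3 ≤ end_ → l.getD 1 0 = 1 ∧
      ∀ i : Nat, i < l.length → 2 ≤ i → (i : Int) < end_ →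
        2 ≤ l.getD i 0 ∧ l.getD i 0 ∣ (i : Int))

instance (end_ : Int) (prime_factors : Option (List Int)) : Decidable (Pre_ndiv_list end_ prime_factors) := by
  unfold Pre_ndiv_list; infer_instance

def pvWitness_ndiv_list : Int × Option (List Int) := (12, none)

def Spec_ndiv_list (end_ : Int) (prime_factors : Option (List Int)) (out : List Int) : Prop := out = ndiv_list_alt end_ prime_factors
instance (end_ : Int) (prime_factors : Option (List Int)) (out : List Int) : Decidable (Spec_ndiv_list end_ prime_factors out) := by unfold Spec_ndiv_list; infer_instance

-- ===== CLAIM (what is proved, stated in full; the proofs are below) =====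
def Claim_equal_ndiv_list : Prop := ∀ (end_ : Int) (prime_factors : Option (List Int)), Dom_ndiv_list end_ prime_factors → Pre_ndiv_list end_ prime_factors → Spec_ndiv_list end_ prime_factors (ndiv_list end_ prime_factors)

-- ===== LEMMAS AND PROOFS =====

-- what both main loops need of the prepared table
def TableOk (t : List Int) (end_ : Int) : Prop :=
  t.length = end_.toNat ∧
  (3 ≤ end_ → t.getD 1 0 = 1 ∧
    ∀ i : Nat, 2 ≤ i → (i : Int) < end_ → 2 ≤ t.getD i 0 ∧ t.getD i 0 ∣ (i : Int))

lemma getD_set_eq (a : List Int) (n : Nat) (v : Int) (h : n < a.length) :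
    (a.set n v).getD n 0 = v := by
  simp [List.getD_eq_getElem?_getD, h]

lemma getD_set_ne (a : List Int) (n m : Nat) (v : Int) (h : n ≠ m) :
    (a.set n v).getD m 0 = a.getD m 0 := by
  simp [List.getD_eq_getElem?_getD, h]

-- sieve invariant: correct length, untouched 0/1 entries, and every entry ≥ 2 divides its index
def SieveInv (end_ : Int) (a : List Int) : Prop :=
  a.length = end_.toNat ∧
  (∀ k : Nat, k < a.length →
    (k < 2 → a.getD k 0 = (k : Int)) ∧
    (2 ≤ k → 2 ≤ a.getD k 0 ∧ a.getD k 0 ∣ (k : Int)))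

lemma sieveInv_pfInner (i end_ : Int) (hi : 2 ≤ i) (a : List Int) (ha : SieveInv end_ a) :
    SieveInv end_ (pfInner i end_ a) := by
  unfold pfInner
  refine List.foldlRecOn _ _ ha ?_
  intro a ha j hj
  rw [PySem.List.mem_pyRange_iff_of_pos (by omega)] at hj
  obtain ⟨hij, hjend, hdvd⟩ := hj
  have hj0 : (0:Int) ≤ j := by omega
  have hidvd : i ∣ j := by simpa using dvd_add hdvd (dvd_refl i)
  split
  · obtain ⟨hlen, hent⟩ := ha
    rw [PySem.List.pySetD_of_nonneg a i hj0]
    have hjlt : j.toNat < a.length := by omega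
    refine ⟨by simp [hlen], ?_⟩
    intro k hk
    rw [List.length_set] at hk
    by_cases hkj : k = j.toNat
    · subst hkj
      rw [getD_set_eq a _ _ hjlt]
      constructor
      · intro h2; omega
      · intro _; exact ⟨hi, by rwa [show ((j.toNat : Nat) : Int) = j by omega]⟩
    · rw [getD_set_ne a _ _ _ (Ne.symm (by omega))]
      exact hent k hk
  · exact ha

lemma sieveInv_init (end_ : Int) : SieveInv end_ (PySem.List.pyRange 0 end_ 1) := by
  have hlen : (PySem.List.pyRange 0 end_ 1).length = end_.toNat := by
    rw [PySem.List.length_pyRange_one]; omega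
  refine ⟨hlen, ?_⟩
  intro k hk
  have hget : (PySem.List.pyRange 0 end_ 1).getD k 0 = (k : Int) := by
    rw [List.getD_eq_getElem?_getD, List.getElem?_eq_getElem hk,
      PySem.List.getElem_pyRange_one 0 end_ k hk]
    simp
  rw [hget]
  exact ⟨fun _ => rfl, fun h2 => ⟨by exact_mod_cast h2, dvd_refl _⟩⟩

lemma sieveInv_pfl (end_ : Int) : SieveInv end_ (prime_factor_list end_) := by
  unfold prime_factor_list
  refine List.foldlRecOn _ _ (sieveInv_init end_) ?_
  intro a ha i hi
  rw [PySem.List.mem_pyRange_one] at hi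
  split
  · exact sieveInv_pfInner i end_ hi.1 a ha
  · exact ha

lemma sieve_tableOk (end_ : Int) (_h : 0 ≤ end_) : TableOk (prime_factor_list end_) end_ := by
  obtain ⟨hlen, hent⟩ := sieveInv_pfl end_
  refine ⟨hlen, fun h3 => ⟨?_, ?_⟩⟩
  · have := (hent 1 (by omega)).1 (by omega)
    simpa using this
  · intro i h2 hiend
    exact (hent i (by omega)).2 h2

lemma getD_take (l : List Int) (n i : Nat) (h : i < n) :
    (l.take n).getD i 0 = l.getD i 0 := by
  simp [List.getD_eq_getElem?_getD, h]

lemma prepare_tableOk (end_ : Int) (pf : Option (List Int)) (h3 : 3 ≤ end_)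
    (hpre : Pre_ndiv_list end_ pf) :
    TableOk (preparePrimeFactors pf end_) end_ := by
  unfold Pre_ndiv_list at hpre
  match pf with
  | none => exact sieve_tableOk end_ (by omega)
  | some l =>
    by_cases hl : l = []
    · subst hl
      simpa [preparePrimeFactors] using sieve_tableOk end_ (by simpa using hpre)
    · simp only [Option.getD_some, hl, if_false] at hpre
      obtain ⟨hlen, hrest⟩ := hpre
      obtain ⟨h1, hent⟩ := hrest h3
      show TableOk (if l = [] then _ else if (l.length : Int) < end_ then _ else _) end_
      rw [if_neg hl, if_neg (by omega), PySem.List.slice_to l (by omega)]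
      refine ⟨by rw [List.length_take]; omega, fun _ => ⟨?_, ?_⟩⟩
      · rw [getD_take l end_.toNat 1 (by omega)]; exact h1
      · intro i h2 hiend
        rw [getD_take l end_.toNat i (by omega)]
        exact hent i (by omega) h2 hiend

-- the two strip loops are the same function
lemma stripA_eq_stripAlt (p : Int) : ∀ fuel je, stripA p fuel je = stripAlt p fuel je := by
  intro fuel
  induction fuel with
  | zero => intro je; rfl
  | succ n ih => intro je; obtain ⟨j, e⟩ := je; simp only [stripA, stripAlt]; split <;> simp [ih]

-- full characterisation of the strip loop with sufficient fuel
lemma strip_spec (p : Int) (hp : 2 ≤ p) :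
    ∀ (fuel : Nat) (c e : Int), 1 ≤ c → c ≤ (fuel : Int) →
      ∃ c' k : Int, stripAlt p fuel (c, e) = (c', e + k) ∧ 1 ≤ c' ∧ 0 ≤ k ∧
        c' ∣ c ∧ ¬ (p ∣ c') ∧ c' ≤ c ∧ (p ∣ c → c' < c ∧ 1 ≤ k) := by
  intro fuel
  induction fuel with
  | zero => intro c e hc hcf; simp at hcf; omega
  | succ n ih =>
    intro c e hc hcf
    by_cases hdvd : p ∣ c
    · obtain ⟨m, hm⟩ := hdvd
      have hm1 : 1 ≤ m := by nlinarith
      have hmc : m < c := by nlinarith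
      have hfd : PySem.Int.floordiv c p = m := by
        rw [PySem.Int.floordiv_eq_ediv_of_pos (by omega), hm,
          Int.mul_ediv_cancel_left m (by omega)]
      obtain ⟨c', k', heq, h1, h0, hdv, hnp, hle, _⟩ :=
        ih m (e + 1) hm1 (by push_cast at hcf ⊢; omega)
      refine ⟨c', k' + 1, ?_, h1, by omega, hdv.trans ⟨p, by linarith⟩, hnp, by omega,
        fun _ => ⟨by omega, by omega⟩⟩
      show stripAlt p (n + 1) (c, e) = (c', e + (k' + 1))
      rw [stripAlt, if_pos (by rw [PySem.Int.mod_eq_zero_iff_dvd]; exact ⟨m, hm⟩), hfd, heq]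
      ring_nf
    · refine ⟨c, 0, ?_, hc, le_refl 0, dvd_refl c, hdvd, le_refl c, fun h => absurd h hdvd⟩
      show stripAlt p (n + 1) (c, e) = (c, e + 0)
      rw [stripAlt, if_neg (by rw [PySem.Int.mod_eq_zero_iff_dvd]; exact hdvd)]
      simp

-- strip result does not depend on the fuel, once the fuel is ≥ c
lemma strip_fuel (p : Int) (hp : 2 ≤ p) :
    ∀ (fuel fuel' : Nat) (c e : Int), 1 ≤ c → c ≤ (fuel : Int) → c ≤ (fuel' : Int) →
      stripAlt p fuel (c, e) = stripAlt p fuel' (c, e) := by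
  intro fuel
  induction fuel with
  | zero => intro fuel' c e hc hcf _; simp at hcf; omega
  | succ n ih =>
    intro fuel' c e hc hcf hcf'
    cases fuel' with
    | zero => simp at hcf'; omega
    | succ n' =>
      by_cases hdvd : p ∣ c
      · obtain ⟨m, hm⟩ := hdvd
        have hm1 : 1 ≤ m := by nlinarith
        have hmc : m < c := by nlinarith
        have hfd : PySem.Int.floordiv c p = m := by
          rw [PySem.Int.floordiv_eq_ediv_of_pos (by omega), hm,
            Int.mul_ediv_cancel_left m (by omega)]
        have hmod : PySem.Int.mod c p = 0 := by
          rw [PySem.Int.mod_eq_zero_iff_dvd]; exact ⟨m, hm⟩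
        show stripAlt p (n + 1) (c, e) = stripAlt p (n' + 1) (c, e)
        rw [stripAlt, stripAlt, if_pos hmod, if_pos hmod, hfd]
        exact ih n' m (e + 1) hm1 (by push_cast at hcf ⊢; omega)
          (by push_cast at hcf' ⊢; omega)
      · have hmod : ¬ PySem.Int.mod c p = 0 := by
          rw [PySem.Int.mod_eq_zero_iff_dvd]; exact hdvd
        show stripAlt p (n + 1) (c, e) = stripAlt p (n' + 1) (c, e)
        rw [stripAlt, stripAlt, if_neg hmod, if_neg hmod]

-- factorCount is multiplicative in its accumulator
lemma factorCount_mul (t : List Int) :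
    ∀ (fuel : Nat) (c r : Int), factorCount t fuel c r = r * factorCount t fuel c 1 := by
  intro fuel
  induction fuel with
  | zero => intro c r; simp [factorCount]
  | succ n ih =>
    intro c r
    show factorCount t (n + 1) c r = r * factorCount t (n + 1) c 1
    rw [factorCount, factorCount]
    split
    · rw [ih _ (r * _), ih _ (1 * _)]; ring
    · simp

-- factorCount does not depend on the fuel, once the fuel is ≥ c (inside a valid table)
lemma factorCount_fuel (t : List Int) (end_ : Int) (hok : TableOk t end_) (h3 : 3 ≤ end_) :
    ∀ (fuel fuel' : Nat) (c r : Int), 1 ≤ c → c < end_ → c ≤ (fuel : Int) → c ≤ (fuel' : Int) →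
      factorCount t fuel c r = factorCount t fuel' c r := by
  intro fuel
  induction fuel with
  | zero => intro fuel' c r hc _ hcf _; simp at hcf; omega
  | succ n ih =>
    intro fuel' c r hc hce hcf hcf'
    cases fuel' with
    | zero => simp at hcf'; omega
    | succ n' =>
      by_cases h1c : 1 < c
      · have hp : PySem.List.pyGetD t c 0 = t.getD c.toNat 0 :=
          PySem.List.pyGetD_of_nonneg t 0 (by omega)
        obtain ⟨hp2, hpdvd⟩ := by
          have := ((hok.2 h3).2 c.toNat (by omega) (by omega))
          rwa [show ((c.toNat : Nat) : Int) = c by omega] at this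
        rw [← hp] at hp2 hpdvd
        obtain ⟨c', k, heq, hc'1, hk0, _, _, hc'le, hlt⟩ :=
          strip_spec (PySem.List.pyGetD t c 0) hp2 c.toNat c 0 (by omega) (by omega)
        obtain ⟨hc'c, _⟩ := hlt hpdvd
        show factorCount t (n + 1) c r = factorCount t (n' + 1) c r
        rw [factorCount, factorCount, if_pos h1c, if_pos h1c]
        simp only [heq]
        exact ih n' c' (r * (0 + k + 1)) hc'1 (by omega) (by omega) (by omega)
      · show factorCount t (n + 1) c r = factorCount t (n' + 1) c r
        rw [factorCount, factorCount, if_neg h1c, if_neg h1c]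

-- the common per-index value both loops write
def dval (t : List Int) (m : Int) : Int := factorCount t m.toNat m 1

-- main loop invariant: processed entries hold dval, the rest still hold the table
def LoopInv (t : List Int) (n : Nat) (a : List Int) : Prop :=
  a.length = t.length ∧
  (∀ k : Nat, 2 ≤ k → k < 2 + n → a.getD k 0 = dval t (k : Int)) ∧
  (∀ k : Nat, k < 2 ∨ 2 + n ≤ k → a.getD k 0 = t.getD k 0)

-- A's loop body writes the same value dval t i as B's, given the loop invariant
lemma aval_eq_dval (t : List Int) (end_ : Int) (hok : TableOk t end_) (h3 : 3 ≤ end_)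
    (n : Nat) (a : List Int) (hinv : LoopInv t n a) (i : Int) (hi : i = 2 + (n : Int))
    (hiend : i < end_) :
    ((stripA (PySem.List.pyGetD a i 0) i.toNat
        (PySem.Int.floordiv i (PySem.List.pyGetD a i 0), 1)).2 + 1) *
      PySem.List.pyGetD a
        (stripA (PySem.List.pyGetD a i 0) i.toNat
          (PySem.Int.floordiv i (PySem.List.pyGetD a i 0), 1)).1 0
      = dval t i := by
  obtain ⟨hlen, hdone, hbelow⟩ := hinv
  -- the read of a[i] still sees the table entry
  have hpa : PySem.List.pyGetD a i 0 = t.getD i.toNat 0 := by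
    rw [PySem.List.pyGetD_of_nonneg a 0 (by omega)]
    exact hbelow i.toNat (Or.inr (by omega))
  obtain ⟨hp2, hpdvd⟩ := by
    have := (hok.2 h3).2 i.toNat (by omega) (by omega)
    rwa [show ((i.toNat : Nat) : Int) = i by omega] at this
  set p := t.getD i.toNat 0 with hpdef
  obtain ⟨m, hm⟩ := hpdvd
  have hm1 : 1 ≤ m := by nlinarith
  have hmi : m < i := by nlinarith
  have hfd : PySem.Int.floordiv i p = m := by
    rw [PySem.Int.floordiv_eq_ediv_of_pos (by omega), hm,
      Int.mul_ediv_cancel_left m (by omega)]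
  -- characterise the strip of i
  obtain ⟨c', k, heq, hc'1, hk0, _, hnp, hc'le, hlt⟩ :=
    strip_spec p hp2 i.toNat i 0 (by omega) (by omega)
  obtain ⟨hc'i, hk1⟩ := hlt ⟨m, hm⟩
  -- A's strip call equals the strip of i
  have hAstrip : stripA p i.toNat (PySem.Int.floordiv i p, 1) = (c', 0 + k) := by
    rw [stripA_eq_stripAlt, hfd]
    have hstep : stripAlt p i.toNat (i, 0) = stripAlt p (i.toNat - 1) (m, 1) := by
      have : i.toNat = (i.toNat - 1) + 1 := by omega
      rw [this]
      show stripAlt p ((i.toNat - 1) + 1) (i, 0) = stripAlt p (i.toNat - 1) (m, 1)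
      rw [stripAlt, if_pos (by rw [PySem.Int.mod_eq_zero_iff_dvd]; exact ⟨m, hm⟩), hfd]
      norm_num
    rw [strip_fuel p hp2 i.toNat (i.toNat - 1) m 1 hm1 (by omega) (by omega), ← hstep, heq]
  -- B's value: one unfolding of factorCount
  have hB : dval t i = factorCount t (i.toNat - 1) c' (1 * (0 + k + 1)) := by
    unfold dval
    have : i.toNat = (i.toNat - 1) + 1 := by omega
    rw [this]
    show factorCount t ((i.toNat - 1) + 1) i 1 = _
    rw [factorCount, if_pos (by omega)]
    rw [PySem.List.pyGetD_of_nonneg t 0 (by omega), ← hpdef]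
    simp only [heq]
    norm_num
  rw [hpa, hAstrip, hB, factorCount_mul]
  -- both reduce to (k+1) * (value at c')
  have hread : PySem.List.pyGetD a c' 0 = factorCount t (i.toNat - 1) c' 1 := by
    rw [PySem.List.pyGetD_of_nonneg a 0 (by omega)]
    by_cases hc2 : c' = 1
    · subst hc2
      rw [show (1 : Int).toNat = 1 from rfl, hbelow 1 (Or.inl (by omega))]
      have hf1 : ∀ f : Nat, factorCount t (f + 1) 1 1 = 1 := by
        intro f; rw [factorCount, if_neg (by omega)]
      have : i.toNat - 1 = (i.toNat - 2) + 1 := by omega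
      rw [this, hf1]
      exact (hok.2 h3).1
    · have hc'2 : 2 ≤ c' := by omega
      rw [hdone c'.toNat (by omega) (by omega),
        show ((c'.toNat : Nat) : Int) = c' by omega]
      unfold dval
      exact factorCount_fuel t end_ hok h3 c'.toNat (i.toNat - 1) c' 1 (by omega)
        (by omega) (by omega) (by omega)
  rw [hread]
  ring

lemma main_fold (t : List Int) (end_ : Int) (hok : TableOk t end_) (h3 : 3 ≤ end_) :
    ∀ n : Nat, (2 + (n : Int)) ≤ end_ →
      (PySem.List.pyRange 2 (2 + (n : Int)) 1).foldl
          (fun a i =>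
            let p := PySem.List.pyGetD a i 0
            let je := stripA p i.toNat (PySem.Int.floordiv i p, 1)
            PySem.List.pySetD a i ((je.2 + 1) * PySem.List.pyGetD a je.1 0)) t
        = (PySem.List.pyRange 2 (2 + (n : Int)) 1).foldl
            (fun a i => PySem.List.pySetD a i (factorCount t i.toNat i 1)) t ∧
      LoopInv t n ((PySem.List.pyRange 2 (2 + (n : Int)) 1).foldl
            (fun a i => PySem.List.pySetD a i (factorCount t i.toNat i 1)) t) := by
  intro n
  induction n with
  | zero =>
    intro _
    rw [show ((0 : Nat) : Int) = 0 from rfl, add_zero, PySem.List.pyRange_one_eq_nil (le_refl 2)]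
    exact ⟨rfl, rfl, by omega, fun k _ => rfl⟩
  | succ n ih =>
    intro hend
    have hend' : 2 + (n : Int) ≤ end_ := by push_cast at hend ⊢; omega
    obtain ⟨hAB, hinv⟩ := ih hend'
    have hsplit : PySem.List.pyRange 2 (2 + ((n + 1 : Nat) : Int)) 1
        = PySem.List.pyRange 2 (2 + (n : Int)) 1 ++ [2 + (n : Int)] := by
      rw [show (2 + ((n + 1 : Nat) : Int)) = (2 + (n : Int)) + 1 by push_cast; ring]
      exact PySem.List.pyRange_one_succ_right (by omega)
    rw [hsplit, List.foldl_append, List.foldl_append, hAB]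
    set i : Int := 2 + (n : Int) with hidef
    set aB := (PySem.List.pyRange 2 (2 + (n : Int)) 1).foldl
      (fun a i => PySem.List.pySetD a i (factorCount t i.toNat i 1)) t with haB
    have hiend : i < end_ := by push_cast at hend; omega
    have hA1 : List.foldl (fun a i =>
        let p := PySem.List.pyGetD a i 0
        let je := stripA p i.toNat (PySem.Int.floordiv i p, 1)
        PySem.List.pySetD a i ((je.2 + 1) * PySem.List.pyGetD a je.1 0)) aB [i]
        = PySem.List.pySetD aB i (dval t i) := by
      simp only [List.foldl_cons, List.foldl_nil]
      rw [aval_eq_dval t end_ hok h3 n aB hinv i rfl hiend]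
    have hB1 : List.foldl (fun a i => PySem.List.pySetD a i (factorCount t i.toNat i 1)) aB [i]
        = PySem.List.pySetD aB i (dval t i) := by
      simp only [List.foldl_cons, List.foldl_nil]; rfl
    rw [hA1, hB1]
    refine ⟨rfl, ?_⟩
    obtain ⟨hlen, hdone, hbelow⟩ := hinv
    have hilen : i.toNat < aB.length := by
      rw [hlen, hok.1]; omega
    rw [PySem.List.pySetD_of_nonneg aB (dval t i) (by omega)]
    refine ⟨by rw [List.length_set]; exact hlen, ?_, ?_⟩
    · intro k hk2 hkn
      by_cases hki : k = i.toNat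
      · rw [hki, getD_set_eq aB _ _ hilen,
          show ((i.toNat : Nat) : Int) = i by omega]
      · rw [getD_set_ne aB _ _ _ (Ne.symm hki)]
        exact hdone k hk2 (by omega)
    · intro k hk
      rw [getD_set_ne aB _ _ _ (Ne.symm (by omega))]
      exact hbelow k (by omega)

-- ===== VERDICT (by name: the statement is the Claim_ definition above) =====
theorem ndiv_list_spec : Claim_equal_ndiv_list := by
  intro end_ pf _ hpre
  unfold Spec_ndiv_list ndiv_list ndiv_list_alt
  by_cases h3 : 3 ≤ end_
  · have hok := prepare_tableOk end_ pf h3 hpre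
    obtain ⟨hAB, _⟩ := main_fold (preparePrimeFactors pf end_) end_ hok h3
      (end_.toNat - 2) (by omega)
    have hr : PySem.List.pyRange 2 end_ 1
        = PySem.List.pyRange 2 (2 + ((end_.toNat - 2 : Nat) : Int)) 1 := by
      congr 1; omega
    rw [hr]
    exact hAB
  · rw [PySem.List.pyRange_one_eq_nil (show end_ ≤ 2 by omega)]
    rfl
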